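-- pv_equiv track=rewrite | github.com/CodeRafay/CipherLab | ciphers/vigenere.py | generate_full_key
-- ===== SOURCE A (Python) =====
-- def generate_full_key(message: str, key: str) -> str:
--     """Generate repeated key matching message length (ignoring non-letters)."""
--     key = key.upper()
--     message_letters = [c for c in message if c.isalpha()]
--     if len(message_letters) == 0:
--         return key
--     repeated = (key * ((len(message_letters) // len(key)) + 1)
--                 )[:len(message_letters)]
--     return repeated
-- ===== SOURCE B (Python) =====
-- def generate_full_key(message: str, key: str) -> str:
--     """Generate repeated key matching message length (ignoring non-letters)."""
--     k = key.upper()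
--     n = sum(1 for c in message if c.isalpha())
--     if n == 0:
--         return k
--     return ''.join(k[i % len(k)] for i in range(n))
-- ===== Notes on version B (the rewrite author's own statement) =====
-- stated objective: alternative
-- what changed: B counts the alphabetic characters with a single generator-sum and builds the key by per-position modular indexing k[i % len(k)], instead of A's collect-into-a-list, multiply-the-string-and-slice strategy.
import Mathlib
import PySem

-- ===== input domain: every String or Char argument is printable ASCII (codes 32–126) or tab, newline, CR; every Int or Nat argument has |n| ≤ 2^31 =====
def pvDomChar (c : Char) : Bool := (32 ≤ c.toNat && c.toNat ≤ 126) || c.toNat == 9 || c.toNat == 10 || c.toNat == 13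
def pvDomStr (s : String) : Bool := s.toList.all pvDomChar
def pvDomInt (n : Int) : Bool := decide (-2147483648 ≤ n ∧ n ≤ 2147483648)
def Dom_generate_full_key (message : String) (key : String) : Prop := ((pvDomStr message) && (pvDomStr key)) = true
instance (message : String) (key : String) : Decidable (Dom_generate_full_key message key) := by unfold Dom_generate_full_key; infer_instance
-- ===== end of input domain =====

-- B differs from A by a different decomposition: A collects the letters into a list and
-- multiplies-and-slices the key; B counts the letters and indexes the key modularly per position.

-- ===== PORT A =====
-- A: key = key.upper(); message_letters = [c for c in message if c.isalpha()];
--    if empty return key; else return (key * (len(letters)//len(key) + 1))[:len(letters)]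
def generate_full_key (message : String) (key : String) : String :=
  let key := PySem.Str.upper key
  let message_letters := message.toList.filter (fun c => PySem.Chars.isalpha c)
  if message_letters.length = 0 then key
  else
    let repeated := PySem.List.slice
      (PySem.List.pyRepeat key.toList
        (PySem.Int.floordiv (message_letters.length : Int) (key.toList.length : Int) + 1))
      none (some (message_letters.length : Int))
    String.ofList repeated

-- ===== PORT B =====
-- B: k = key.upper(); n = sum(1 for c in message if c.isalpha());
--    if n == 0 return k; else ''.join(k[i % len(k)] for i in range(n))
-- k[i % len(k)]: the index is in range whenever k ≠ "" (guaranteed by Pre_), so the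
-- total lookup List.getD is exact there.
def generate_full_key_alt (message : String) (key : String) : String :=
  let k := PySem.Str.upper key
  let n := message.toList.foldl (fun acc c => if PySem.Chars.isalpha c then acc + 1 else acc) 0
  if n = 0 then k
  else String.ofList ((List.range n).map (fun i => k.toList.getD (i % k.toList.length) 'A'))

-- ===== PRECONDITION & SPEC =====
-- Pre_ excludes exactly the inputs where Python A raises ZeroDivisionError:
-- an empty key together with a message containing at least one alphabetic character.
def Pre_generate_full_key (message : String) (key : String) : Prop :=
  key ≠ "" ∨ ∀ c ∈ message.toList, PySem.Chars.isalpha c = false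
instance (message : String) (key : String) : Decidable (Pre_generate_full_key message key) := by
  unfold Pre_generate_full_key; infer_instance
def pvWitness_generate_full_key : String × String := ("Attack at dawn!", "key")

def Spec_generate_full_key (message : String) (key : String) (out : String) : Prop := out = generate_full_key_alt message key
instance (message : String) (key : String) (out : String) : Decidable (Spec_generate_full_key message key out) := by unfold Spec_generate_full_key; infer_instance

-- ===== CLAIM (what is proved, stated in full; the proofs are below) =====
def Claim_equal_generate_full_key : Prop := ∀ (message : String) (key : String), Dom_generate_full_key message key → Pre_generate_full_key message key → Spec_generate_full_key message key (generate_full_key message key)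

-- ===== LEMMAS AND PROOFS =====

-- B's counting fold equals the length of A's filtered list.
theorem pv_count_eq (l : List Char) (acc : Nat) :
    l.foldl (fun acc c => if PySem.Chars.isalpha c then acc + 1 else acc) acc
      = acc + (l.filter (fun c => PySem.Chars.isalpha c)).length := by
  induction l generalizing acc with
  | nil => simp
  | cons c t ih =>
    simp only [List.foldl_cons, List.filter_cons]
    by_cases h : PySem.Chars.isalpha c
    · simp [h, ih]; omega
    · simp [h, ih]

theorem pv_length_flatten_replicate {α : Type} (k : List α) (m : Nat) :
    ((List.replicate m k).flatten).length = m * k.length := by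
  induction m with
  | zero => simp
  | succ m ih => simp [List.replicate_succ, ih]; ring

theorem pv_getElem_flatten_replicate {α : Type} (k : List α) (m i : Nat)
    (h : i < ((List.replicate m k).flatten).length) (hk : 0 < k.length) :
    ((List.replicate m k).flatten)[i] = k[i % k.length]'(Nat.mod_lt _ hk) := by
  induction m generalizing i with
  | zero => simp at h
  | succ m ih =>
    simp only [List.replicate_succ, List.flatten_cons] at h ⊢
    by_cases hi : i < k.length
    · rw [List.getElem_append_left hi]
      congr 1
      exact (Nat.mod_eq_of_lt hi).symm
    · push Not at hi
      rw [List.getElem_append_right hi]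
      have h2 : i - k.length < ((List.replicate m k).flatten).length := by
        simp at h ⊢; omega
      rw [ih (i - k.length) h2]
      congr 1
      obtain ⟨j, rfl⟩ : ∃ j, i = k.length + j := ⟨i - k.length, by omega⟩
      simp [Nat.add_mod_left]

-- The core identity: the truncated multiplied key equals the modularly-indexed build.
theorem pv_core (k : List Char) (n : Nat) (hk : 0 < k.length) :
    ((List.replicate (n / k.length + 1) k).flatten).take n
      = (List.range n).map (fun i => k.getD (i % k.length) 'A') := by
  have hlen : ((List.replicate (n / k.length + 1) k).flatten).length = (n / k.length + 1) * k.length :=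
    pv_length_flatten_replicate k _
  have hle : n ≤ (n / k.length + 1) * k.length := by
    have := Nat.div_add_mod n k.length
    have := Nat.mod_lt n hk
    nlinarith
  apply List.ext_getElem
  · simp [hlen]; omega
  · intro i h1 h2
    have hi : i < n := by simp at h2; omega
    have hif : i < ((List.replicate (n / k.length + 1) k).flatten).length := by omega
    rw [List.getElem_take, List.getElem_map, List.getElem_range,
        pv_getElem_flatten_replicate k _ i hif hk]
    rw [List.getD_eq_getElem?_getD, List.getElem?_eq_getElem (Nat.mod_lt _ hk)]
    rfl

-- ===== VERDICT (by name: the statement is the Claim_ definition above) =====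
theorem generate_full_key_spec : Claim_equal_generate_full_key := by
  intro message key _ hpre
  unfold Spec_generate_full_key generate_full_key generate_full_key_alt
  simp only [pv_count_eq, Nat.zero_add]
  set k := PySem.Str.upper key with hk
  set letters := message.toList.filter (fun c => PySem.Chars.isalpha c) with hl
  by_cases h0 : letters.length = 0
  · simp [h0]
  · simp only [h0, if_false]
    have hkey : key ≠ "" := by
      rcases hpre with h | h
      · exact h
      · exfalso; apply h0
        simp only [hl, List.length_eq_zero_iff, List.filter_eq_nil_iff]
        intro c hc
        simp [h c hc]
    have hkl : 0 < k.toList.length := by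
      rw [hk, PySem.Str.toList_upper]
      simp only [PySem.Chars.upper, List.length_map]
      rw [List.length_pos_iff]
      intro hl
      apply hkey
      have := congrArg String.ofList hl
      rwa [String.ofList_toList] at this
    rw [PySem.Int.floordiv_natCast]
    have : ((letters.length / k.toList.length : Nat) : Int) + 1
        = ((letters.length / k.toList.length + 1 : Nat) : Int) := by push_cast; ring
    rw [this]
    unfold PySem.List.pyRepeat
    rw [Int.toNat_natCast, PySem.List.slice_to_natCast]
    rw [pv_core k.toList letters.length hkl]
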